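-- pv_equiv track=rewrite | github.com/Nazim-Mechkouri/miR-202-in-Oryzias_latipes | scripts/script_remove_clade-names.py | remove_clade_names
-- ===== SOURCE A (Python) =====
-- def remove_clade_names(newick_str):
--     # Split the Newick string by commas and parentheses
--     tokens = []
--     current_token = ""
--     for char in newick_str:
--         if char in "(),":
--             if current_token.strip():  # Ignore empty tokens (e.g., caused by double commas)
--                 tokens.append(current_token.strip())
--             tokens.append(char)
--             current_token = ""
--         else:
--             current_token += char
--     if current_token.strip():
--         tokens.append(current_token.strip())
--
--     # Remove clade names and associated distances (e.g., "XXXX:0")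
--     cleaned_tokens = []
--     for token in tokens:
--         if ":" in token and token.split(":")[-1] == "0":
--             continue  # Skip tokens with clade names and distance 0
--         cleaned_tokens.append(token)
--
--     # Reconstruct the Newick string without clade names
--     cleaned_newick = "".join(cleaned_tokens)
--
--     return cleaned_newick
-- ===== SOURCE B (Python) =====
-- def _clean(t):
--     t = t.strip()
--     if not t:
--         return ''
--     if ':' in t and t.split(':')[-1] == '0':
--         return ''
--     return t
--
--
-- def remove_clade_names(newick_str):
--     # Recursive decomposition: cut at the first delimiter, clean the piece
--     # before it (strip / drop empty / drop zero-distance), keep the delimiter,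
--     # and recurse on the remainder; filtering is fused into _clean.
--     i = next((k for k, c in enumerate(newick_str) if c in '(),'), -1)
--     if i == -1:
--         return _clean(newick_str)
--     return _clean(newick_str[:i]) + newick_str[i] + remove_clade_names(newick_str[i + 1:])
-- ===== Notes on version B (the rewrite author's own statement) =====
-- stated objective: alternative
-- what changed: Replaces A's stateful char-accumulator tokenizer followed by a second filtering pass and a join with a recursive decomposition that cuts the string at the first delimiter, cleans each delimiter-free piece in place (strip, drop empty, drop zero-distance tokens fused into one helper) and recurses on the remainder.
import Mathlib
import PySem

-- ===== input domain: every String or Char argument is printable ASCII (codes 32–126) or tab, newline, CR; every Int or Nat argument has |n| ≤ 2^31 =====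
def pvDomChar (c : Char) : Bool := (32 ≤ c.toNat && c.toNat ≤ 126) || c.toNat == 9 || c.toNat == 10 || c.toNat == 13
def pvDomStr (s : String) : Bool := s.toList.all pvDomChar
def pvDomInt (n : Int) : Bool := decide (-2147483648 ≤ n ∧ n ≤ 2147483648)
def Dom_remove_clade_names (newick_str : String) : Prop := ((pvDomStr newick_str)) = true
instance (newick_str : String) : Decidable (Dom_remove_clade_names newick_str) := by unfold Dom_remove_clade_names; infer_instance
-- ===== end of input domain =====

-- B replaces A's char-accumulator tokenizer + separate filtering pass by a recursive
-- cut-at-first-delimiter decomposition with the cleaning fused per piece (objective: alternative).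


-- ===== PORT A =====
-- char in "(),"   (shared char-class test; used verbatim by both Pythons)
def pvIsDelim (c : Char) : Bool := "(),".toList.contains c

-- ":" in token and token.split(":")[-1] == "0"   (the zero-distance test, identical text in A and B)
def pvDropTok (t : List Char) : Bool :=
  PySem.Chars.isIn [':'] t &&
    decide (PySem.List.pyGet? (PySem.Chars.splitOn t [':']) (-1) = some ['0'])

-- if current_token.strip(): tokens.append(current_token.strip())   (A repeats these lines after the loop)
def pvFlush (toks : List (List Char)) (cur : List Char) : List (List Char) :=
  if PySem.Chars.strip cur ≠ [] then toks ++ [PySem.Chars.strip cur] else toks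

-- one iteration of A's tokenizing loop; state = (tokens, current_token)
def pvStepA (st : List (List Char) × List Char) (c : Char) : List (List Char) × List Char :=
  if pvIsDelim c then (pvFlush st.1 st.2 ++ [[c]], []) else (st.1, st.2 ++ [c])

def remove_clade_names (newick_str : String) : String :=
  let st := newick_str.toList.foldl pvStepA ([], [])
  let tokens := pvFlush st.1 st.2
  let cleaned := tokens.foldl (fun acc t => if pvDropTok t then acc else acc ++ [t]) []
  String.ofList (PySem.Chars.join [] cleaned)

-- ===== PORT B =====
-- _clean(t): strip, drop if empty, drop if zero-distance token, else keep
def pvClean (t : List Char) : List Char :=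
  let u := PySem.Chars.strip t
  if u = [] then [] else if pvDropTok u then [] else u

-- i = first index carrying a delimiter (or -1); s[:i] is then exactly the maximal
-- delimiter-free prefix (takeWhile) and s[i] :: s[i+1:] the dropWhile remainder — exact.
def pvRemoveB (s : List Char) : List Char :=
  match h : s.dropWhile (fun c => !pvIsDelim c) with
  | [] => pvClean s
  | d :: rest => pvClean (s.takeWhile (fun c => !pvIsDelim c)) ++ [d] ++ pvRemoveB rest
termination_by s.length
decreasing_by
  have h1 : (s.dropWhile (fun c => !pvIsDelim c)).length ≤ s.length :=
    List.length_dropWhile_le _ _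
  rw [h] at h1; simp at h1; omega

def remove_clade_names_alt (newick_str : String) : String :=
  String.ofList (pvRemoveB newick_str.toList)

-- ===== PRECONDITION & SPEC =====
def Spec_remove_clade_names (newick_str : String) (out : String) : Prop := out = remove_clade_names_alt newick_str
instance (newick_str : String) (out : String) : Decidable (Spec_remove_clade_names newick_str out) := by unfold Spec_remove_clade_names; infer_instance

-- ===== CLAIM (what is proved, stated in full; the proofs are below) =====
def Claim_equal_remove_clade_names : Prop := ∀ (newick_str : String), Dom_remove_clade_names newick_str → Spec_remove_clade_names newick_str (remove_clade_names newick_str)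

-- ===== LEMMAS AND PROOFS =====

-- "filter then join" view of A's output-building loop
def pvF (toks : List (List Char)) : List Char :=
  PySem.Chars.join [] (toks.filter (fun t => !pvDropTok t))

theorem pvJoin_nil (l : List (List Char)) : PySem.Chars.join [] l = l.flatten := by
  induction l with
  | nil => rfl
  | cons h t ih =>
    cases t <;> simp_all [PySem.Chars.join, List.intercalate, List.intersperse]

theorem pvF_append (X Y : List (List Char)) : pvF (X ++ Y) = pvF X ++ pvF Y := by
  simp [pvF, pvJoin_nil, List.filter_append]

theorem pvF_flush (T : List (List Char)) (u : List Char) :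
    pvF (pvFlush T u) = pvF T ++ pvClean u := by
  unfold pvFlush pvClean
  by_cases h : PySem.Chars.strip u = []
  · simp [h]
  · by_cases hd : pvDropTok (PySem.Chars.strip u) <;>
      simp [h, hd, pvF, pvJoin_nil]

theorem pvDropTok_delim (d : Char) (hd : pvIsDelim d = true) : pvDropTok [d] = false := by
  have : d = '(' ∨ d = ')' ∨ d = ',' := by
    simp [pvIsDelim] at hd
    rcases hd with h | h | h <;> simp [h]
  rcases this with h | h | h <;> subst h <;> decide

theorem pvDelim_of_dropWhile (s : List Char) (d : Char) (rest : List Char)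
    (h : s.dropWhile (fun c => !pvIsDelim c) = d :: rest) : pvIsDelim d = true := by
  have := List.head?_dropWhile_not (fun c => !pvIsDelim c) s
  rw [h] at this; simpa using this

theorem pvRemoveB_nil (s : List Char)
    (h : s.dropWhile (fun c => !pvIsDelim c) = []) : pvRemoveB s = pvClean s := by
  rw [pvRemoveB.eq_def]
  split
  · rfl
  · rename_i d' rest' h'; rw [h] at h'; cases h'

theorem pvRemoveB_cons (s : List Char) (d : Char) (rest : List Char)
    (h : s.dropWhile (fun c => !pvIsDelim c) = d :: rest) :
    pvRemoveB s = pvClean (s.takeWhile (fun c => !pvIsDelim c)) ++ [d] ++ pvRemoveB rest := by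
  rw [pvRemoveB.eq_def]
  split
  · rename_i h'; rw [h] at h'; cases h'
  · rename_i d' rest' h'
    rw [h] at h'
    obtain ⟨rfl, rfl⟩ := List.cons.injEq .. |>.mp h' |>.imp id id
    rfl

theorem pvFoldl_nodelim (pre : List Char) (T : List (List Char)) (C : List Char)
    (hp : ∀ c ∈ pre, pvIsDelim c = false) :
    pre.foldl pvStepA (T, C) = (T, C ++ pre) := by
  induction pre generalizing C with
  | nil => simp
  | cons c cs ih =>
    have hc : pvIsDelim c = false := hp c (by simp)
    simp only [List.foldl_cons, pvStepA, hc, Bool.false_eq_true, if_false]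
    rw [ih (C ++ [c]) (fun x hx => hp x (by simp [hx]))]
    simp

theorem pvMain (s : List Char) : ∀ T : List (List Char),
    pvF (pvFlush (s.foldl pvStepA (T, [])).1 (s.foldl pvStepA (T, [])).2) =
      pvF T ++ pvRemoveB s := by
  induction s using pvRemoveB.induct with
  | case1 s h =>
    intro T
    have hall : ∀ c ∈ s, pvIsDelim c = false := by
      intro c hc
      have := List.dropWhile_eq_nil_iff.mp h c hc
      simpa using this
    rw [pvFoldl_nodelim s T [] hall, pvRemoveB_nil s h]
    simpa using pvF_flush T s
  | case2 s d rest h ih =>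
    intro T
    have hpre : s = s.takeWhile (fun c => !pvIsDelim c) ++ d :: rest := by
      conv_lhs => rw [← List.takeWhile_append_dropWhile (p := fun c => !pvIsDelim c) (l := s)]
      rw [h]
    have hd : pvIsDelim d = true := pvDelim_of_dropWhile s d rest h
    have hallpre : ∀ c ∈ s.takeWhile (fun c => !pvIsDelim c), pvIsDelim c = false := by
      intro c hc
      have := List.mem_takeWhile_imp hc
      simpa using this
    conv_lhs => rw [hpre]
    rw [List.foldl_append, pvFoldl_nodelim _ T [] hallpre]
    simp only [List.foldl_cons]
    have hstep : pvStepA (T, [] ++ s.takeWhile (fun c => !pvIsDelim c)) d =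
        (pvFlush T (s.takeWhile (fun c => !pvIsDelim c)) ++ [[d]], []) := by
      simp [pvStepA, hd]
    rw [hstep, ih, pvRemoveB_cons s d rest h, pvF_append, pvF_flush]
    have hFd : pvF [[d]] = [d] := by
      simp [pvF, pvDropTok_delim d hd]
    rw [hFd]
    simp

-- ===== VERDICT (by name: the statement is the Claim_ definition above) =====
theorem remove_clade_names_spec : Claim_equal_remove_clade_names := by
  intro s _
  show remove_clade_names s = remove_clade_names_alt s
  simp only [remove_clade_names, remove_clade_names_alt]
  rw [show (fun (acc : List (List Char)) (t : List Char) => if pvDropTok t then acc else acc ++ [t]) =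
      (fun acc t => if (!pvDropTok t) = true then acc ++ [(fun t => t) t] else acc) by
    funext acc t; by_cases h : pvDropTok t <;> simp [h]]
  rw [PySem.List.foldl_append_if (fun t => !pvDropTok t) (fun t => t)
    (pvFlush (s.toList.foldl pvStepA ([], [])).1 (s.toList.foldl pvStepA ([], [])).2) []]
  have hm := pvMain s.toList []
  simp only [pvF, List.filter_nil, pvJoin_nil, List.flatten_nil, List.nil_append,
    List.map_id'] at hm ⊢
  rw [hm]
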